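-- pv_equiv track=rewrite | github.com/a-dyomin/crm-real-estate | app/services/parser_collectors.py | _is_listing_record
-- ===== SOURCE A (Python) =====
-- from typing import Any
--
-- def _is_listing_record(record: dict[str, Any]) -> bool:
--     keys = {str(key).lower() for key in record.keys()}
--     score = 0
--     if keys & {"title", "name", "heading"}:
--         score += 1
--     if keys & {"price", "cost", "price_value", "amount"}:
--         score += 1
--     if keys & {"address", "location", "addressraw", "streetaddress"}:
--         score += 1
--     if keys & {"area", "area_sqm", "square", "sqm", "floorarea"}:
--         score += 1
--     if keys & {"url", "link", "href", "detail_url"}: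
--         score += 1
--     return score >= 2
-- ===== SOURCE B (Python) =====
-- # B: invert the loop: one pass over the record's keys, mapping each lowered key
-- # to its category index (0..4) and collecting the distinct matched categories
-- # into a set; returns len(matched) >= 2.  Same result as A's five
-- # set-intersection score tests (objective: alternative decomposition).
--
-- _CATEGORIES = (
--     ("title", "name", "heading"),
--     ("price", "cost", "price_value", "amount"),
--     ("address", "location", "addressraw", "streetaddress"),
--     ("area", "area_sqm", "square", "sqm", "floorarea"),
--     ("url", "link", "href", "detail_url"),
-- )
--
-- def _category(word):
--     for idx, words in enumerate(_CATEGORIES):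
--         if word in words:
--             return idx
--     return None
--
-- def _is_listing_record(record):
--     matched = set()
--     for key in record.keys():
--         cat = _category(str(key).lower())
--         if cat is not None:
--             matched.add(cat)
--     return len(matched) >= 2
-- ===== Notes on version B (the rewrite author's own statement) =====
-- stated objective: alternative
-- what changed: Inverts the traversal: instead of building a set of lowered keys and testing five set intersections with a score counter, B maps each key once to its category index (0..4) via a keyword->category lookup and collects the distinct matched categories into a set, returning len(matched) >= 2.
import Mathlib
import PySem

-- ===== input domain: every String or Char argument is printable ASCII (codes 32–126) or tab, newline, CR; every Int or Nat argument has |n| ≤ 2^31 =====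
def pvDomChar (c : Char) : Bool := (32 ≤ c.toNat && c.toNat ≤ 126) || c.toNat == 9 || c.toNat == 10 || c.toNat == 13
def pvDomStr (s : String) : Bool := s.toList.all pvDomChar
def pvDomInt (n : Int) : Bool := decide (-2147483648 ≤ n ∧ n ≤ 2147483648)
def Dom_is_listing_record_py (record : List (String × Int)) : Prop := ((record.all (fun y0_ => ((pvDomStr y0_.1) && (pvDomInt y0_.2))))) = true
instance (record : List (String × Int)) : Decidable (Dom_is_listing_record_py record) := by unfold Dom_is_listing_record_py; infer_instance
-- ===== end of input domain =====

-- B inverts the traversal: one pass over the keys mapping each lowered key to its category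
-- index and collecting the distinct matched categories, instead of A's five set
-- intersections with a score counter (objective: alternative).

-- ===== PORT A =====
def is_listing_record_py (record : List (String × Int)) : Bool :=
  let keys : PySem.Set String := PySem.Set.ofList (record.map (fun p => PySem.Str.lower p.1))
  let score : Int := 0
  let score := if !(PySem.Set.inter keys (PySem.Set.ofList ["title", "name", "heading"])).isEmpty then score + 1 else score
  let score := if !(PySem.Set.inter keys (PySem.Set.ofList ["price", "cost", "price_value", "amount"])).isEmpty then score + 1 else score
  let score := if !(PySem.Set.inter keys (PySem.Set.ofList ["address", "location", "addressraw", "streetaddress"])).isEmpty then score + 1 else score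
  let score := if !(PySem.Set.inter keys (PySem.Set.ofList ["area", "area_sqm", "square", "sqm", "floorarea"])).isEmpty then score + 1 else score
  let score := if !(PySem.Set.inter keys (PySem.Set.ofList ["url", "link", "href", "detail_url"])).isEmpty then score + 1 else score
  decide (score ≥ 2)

-- ===== PORT B =====
-- Source B's enumerate(_CATEGORIES) as an indexed literal list
def pvCategories : List (Int × List String) :=
  [(0, ["title", "name", "heading"]),
   (1, ["price", "cost", "price_value", "amount"]),
   (2, ["address", "location", "addressraw", "streetaddress"]),
   (3, ["area", "area_sqm", "square", "sqm", "floorarea"]),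
   (4, ["url", "link", "href", "detail_url"])]

-- Source B's _category: first category whose word tuple contains the word, else None
def pvCategoryGo : List (Int × List String) → String → Option Int
  | [], _ => none
  | (idx, ws) :: rest, w => if w ∈ ws then some idx else pvCategoryGo rest w

def pvCategory (word : String) : Option Int := pvCategoryGo pvCategories word

def is_listing_record_py_alt (record : List (String × Int)) : Bool :=
  let matched : PySem.Set Int := record.foldl (fun m p =>
    match pvCategory (PySem.Str.lower p.1) with
    | some i => PySem.Set.add m i
    | none => m) PySem.Set.empty
  decide (PySem.Set.len matched ≥ 2)

-- ===== PRECONDITION & SPEC =====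
def Spec_is_listing_record_py (record : List (String × Int)) (out : Bool) : Prop := out = is_listing_record_py_alt record
instance (record : List (String × Int)) (out : Bool) : Decidable (Spec_is_listing_record_py record out) := by unfold Spec_is_listing_record_py; infer_instance

-- ===== CLAIM (what is proved, stated in full; the proofs are below) =====
def Claim_equal_is_listing_record_py : Prop := ∀ (record : List (String × Int)), Dom_is_listing_record_py record → Spec_is_listing_record_py record (is_listing_record_py record)

-- ===== LEMMAS AND PROOFS =====

-- characterisation of Source B's keyword → category lookup
theorem cat_get (w : String) (i : Int) : pvCategory w = some i ↔
    (i = 0 ∧ w ∈ ["title", "name", "heading"]) ∨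
    (i = 1 ∧ w ∈ ["price", "cost", "price_value", "amount"]) ∨
    (i = 2 ∧ w ∈ ["address", "location", "addressraw", "streetaddress"]) ∨
    (i = 3 ∧ w ∈ ["area", "area_sqm", "square", "sqm", "floorarea"]) ∨
    (i = 4 ∧ w ∈ ["url", "link", "href", "detail_url"]) := by
  constructor
  · intro h
    simp only [pvCategory, pvCategories, pvCategoryGo] at h
    split_ifs at h with h0 h1 h2 h3 h4 <;> simp_all
  · rintro (⟨rfl, hw⟩ | ⟨rfl, hw⟩ | ⟨rfl, hw⟩ | ⟨rfl, hw⟩ | ⟨rfl, hw⟩) <;>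
      (simp only [List.mem_cons, List.not_mem_nil, or_false] at hw;
       rcases hw with rfl | rfl | rfl | rfl | rfl <;> decide)

-- A's truthiness test `keys & cat` rewritten as an existential over the record
theorem condA (record : List (String × Int)) (cat : List String) :
    (!(PySem.Set.inter (PySem.Set.ofList (record.map (fun p => PySem.Str.lower p.1))) (PySem.Set.ofList cat)).isEmpty) =
      decide (∃ p ∈ record, PySem.Str.lower p.1 ∈ cat) := by
  by_cases h : ∃ p ∈ record, PySem.Str.lower p.1 ∈ cat
  · obtain ⟨p, hp, hw⟩ := h
    have hx : PySem.Str.lower p.1 ∈ PySem.Set.inter (PySem.Set.ofList (record.map (fun p => PySem.Str.lower p.1))) (PySem.Set.ofList cat) := by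
      rw [PySem.Set.mem_inter]
      exact ⟨by rw [PySem.Set.mem_ofList]; exact List.mem_map.mpr ⟨p, hp, rfl⟩,
             by rw [PySem.Set.mem_ofList]; exact hw⟩
    simp only [decide_eq_true (show ∃ p ∈ record, PySem.Str.lower p.1 ∈ cat from ⟨p, hp, hw⟩), Bool.not_eq_true']
    rw [List.isEmpty_eq_false_iff_exists_mem]
    exact ⟨_, hx⟩
  · simp only [decide_eq_false h, Bool.not_eq_false']
    rw [List.isEmpty_iff, List.eq_nil_iff_forall_not_mem]
    intro x hx
    rw [PySem.Set.mem_inter, PySem.Set.mem_ofList, PySem.Set.mem_ofList] at hx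
    obtain ⟨hx1, hx2⟩ := hx
    obtain ⟨p, hp, rfl⟩ := List.mem_map.mp hx1
    exact h ⟨p, hp, hx2⟩

-- membership in B's accumulated set of matched categories
theorem mem_matched (l : List (String × Int)) (m : PySem.Set Int) (i : Int) :
    (i ∈ l.foldl (fun m p =>
      match pvCategory (PySem.Str.lower p.1) with
      | some j => PySem.Set.add m j
      | none => m) m) ↔ i ∈ m ∨ ∃ p ∈ l, pvCategory (PySem.Str.lower p.1) = some i := by
  induction l generalizing m with
  | nil => simp
  | cons p t ih =>
    simp only [List.foldl_cons, List.mem_cons]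
    cases hg : pvCategory (PySem.Str.lower p.1) with
    | none => rw [ih]; simp [hg]
    | some j => rw [ih]; simp [PySem.Set.mem_add, hg]; tauto

theorem nodup_matched (l : List (String × Int)) (m : PySem.Set Int) (hm : m.Nodup) :
    (l.foldl (fun m p =>
      match pvCategory (PySem.Str.lower p.1) with
      | some j => PySem.Set.add m j
      | none => m) m).Nodup := by
  induction l generalizing m with
  | nil => exact hm
  | cons p t ih =>
    simp only [List.foldl_cons]
    refine ih _ ?_
    cases hg : pvCategory (PySem.Str.lower p.1) with
    | none => simpa [hg] using hm
    | some j => simpa [hg] using PySem.Set.nodup_add m j hm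

-- counting: a Nodup list whose members are exactly the hit categories has length = A's score
theorem length_of_mem_iff (m : List Int) (hnd : m.Nodup)
    (b0 b1 b2 b3 b4 : Prop) [Decidable b0] [Decidable b1] [Decidable b2] [Decidable b3] [Decidable b4]
    (hm : ∀ i : Int, i ∈ m ↔ (i = 0 ∧ b0) ∨ (i = 1 ∧ b1) ∨ (i = 2 ∧ b2) ∨ (i = 3 ∧ b3) ∨ (i = 4 ∧ b4)) :
    (m.length : Int) = (if b0 then 1 else 0) + (if b1 then 1 else 0) + (if b2 then 1 else 0)
      + (if b3 then 1 else 0) + (if b4 then 1 else 0) := by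
  have hperm : m.Perm ((if b0 then [(0 : Int)] else []) ++ (if b1 then [1] else []) ++
      (if b2 then [2] else []) ++ (if b3 then [3] else []) ++ (if b4 then [4] else [])) := by
    rw [List.perm_ext_iff_of_nodup hnd (by split_ifs <;> decide)]
    intro i
    rw [hm]
    split_ifs <;> simp_all
  rw [hperm.length_eq]
  simp only [List.length_append]
  split_ifs <;> simp

-- ===== VERDICT (by name: the statement is the Claim_ definition above) =====
set_option maxHeartbeats 1000000 in
theorem is_listing_record_py_spec : Claim_equal_is_listing_record_py := by
  intro record _
  unfold Spec_is_listing_record_py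
  simp only [is_listing_record_py, is_listing_record_py_alt, condA]
  set matched := record.foldl (fun m p =>
    match pvCategory (PySem.Str.lower p.1) with
    | some j => PySem.Set.add m j
    | none => m) PySem.Set.empty with hmdef
  have hmem : ∀ i : Int, i ∈ matched ↔
      (i = 0 ∧ ∃ p ∈ record, PySem.Str.lower p.1 ∈ ["title", "name", "heading"]) ∨
      (i = 1 ∧ ∃ p ∈ record, PySem.Str.lower p.1 ∈ ["price", "cost", "price_value", "amount"]) ∨
      (i = 2 ∧ ∃ p ∈ record, PySem.Str.lower p.1 ∈ ["address", "location", "addressraw", "streetaddress"]) ∨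
      (i = 3 ∧ ∃ p ∈ record, PySem.Str.lower p.1 ∈ ["area", "area_sqm", "square", "sqm", "floorarea"]) ∨
      (i = 4 ∧ ∃ p ∈ record, PySem.Str.lower p.1 ∈ ["url", "link", "href", "detail_url"]) := by
    intro i
    rw [hmdef, mem_matched]
    simp only [PySem.Set.empty, List.not_mem_nil, false_or]
    constructor
    · rintro ⟨p, hp, hg⟩
      rcases (cat_get _ _).mp hg with ⟨hi, hw⟩ | ⟨hi, hw⟩ | ⟨hi, hw⟩ | ⟨hi, hw⟩ | ⟨hi, hw⟩ <;>
        [exact Or.inl ⟨hi, p, hp, hw⟩; exact Or.inr (Or.inl ⟨hi, p, hp, hw⟩);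
         exact Or.inr (Or.inr (Or.inl ⟨hi, p, hp, hw⟩));
         exact Or.inr (Or.inr (Or.inr (Or.inl ⟨hi, p, hp, hw⟩)));
         exact Or.inr (Or.inr (Or.inr (Or.inr ⟨hi, p, hp, hw⟩)))]
    · rintro (⟨hi, p, hp, hw⟩ | ⟨hi, p, hp, hw⟩ | ⟨hi, p, hp, hw⟩ | ⟨hi, p, hp, hw⟩ | ⟨hi, p, hp, hw⟩) <;>
        [exact ⟨p, hp, (cat_get _ _).mpr (Or.inl ⟨hi, hw⟩)⟩;
         exact ⟨p, hp, (cat_get _ _).mpr (Or.inr (Or.inl ⟨hi, hw⟩))⟩;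
         exact ⟨p, hp, (cat_get _ _).mpr (Or.inr (Or.inr (Or.inl ⟨hi, hw⟩)))⟩;
         exact ⟨p, hp, (cat_get _ _).mpr (Or.inr (Or.inr (Or.inr (Or.inl ⟨hi, hw⟩))))⟩;
         exact ⟨p, hp, (cat_get _ _).mpr (Or.inr (Or.inr (Or.inr (Or.inr ⟨hi, hw⟩))))⟩]
  have hnd : matched.Nodup := nodup_matched record PySem.Set.empty List.nodup_nil
  have hlen := length_of_mem_iff matched hnd _ _ _ _ _ hmem
  simp only [PySem.Set.len]
  rw [decide_eq_decide]
  simp only [decide_eq_true_eq]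
  split_ifs at hlen ⊢ <;> omega
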